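-- pv_equiv track=rewrite | github.com/ilugr/FTI_Curvas | ELC/curva_hilbert.py | hilbert_curve
-- ===== SOURCE A (Python) =====
-- config = {
--     "velocidad": 0,
--     "background_color": "gray",
--     "pensize": 5,
--     "posicion_inicial": (-500, -200),
--     "color_inicial": "blue",
--     "reglas": {
--         "X": "+YF-XFX-FY+",
--         "Y": "-XF+YFY+FX-"
--     },
--     "tamanio_segmento": 7,
--     "angulo": 90,
--     "iteraciones": 8
-- }
--
-- def hilbert_curve(iteraciones):
--     cadena_inicial = "X"
--     for _ in range(iteraciones):
--         dibujo = ""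
--         for letra in cadena_inicial:
--             # Aplica las reglas usando el diccionario
--             dibujo += config["reglas"].get(letra, letra)
--         cadena_inicial = dibujo
--
--     return cadena_inicial
-- ===== SOURCE B (Python) =====
-- reglas = {
--     "X": "+YF-XFX-FY+",
--     "Y": "-XF+YFY+FX-"
-- }
--
-- def hilbert_curve(iteraciones):
--     def expand(symbol, depth):
--         if depth <= 0:
--             return symbol
--         return "".join(expand(c, depth - 1) for c in reglas.get(symbol, symbol))
--     return expand("X", iteraciones)
-- ===== Notes on version B (the rewrite author's own statement) =====
-- stated objective: alternative
-- what changed: Replaces the level-by-level iterative rewriting of the whole string with a depth-first recursive per-symbol expansion expand(symbol, depth) that concatenates the expansions of each rule character.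
import Mathlib
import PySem

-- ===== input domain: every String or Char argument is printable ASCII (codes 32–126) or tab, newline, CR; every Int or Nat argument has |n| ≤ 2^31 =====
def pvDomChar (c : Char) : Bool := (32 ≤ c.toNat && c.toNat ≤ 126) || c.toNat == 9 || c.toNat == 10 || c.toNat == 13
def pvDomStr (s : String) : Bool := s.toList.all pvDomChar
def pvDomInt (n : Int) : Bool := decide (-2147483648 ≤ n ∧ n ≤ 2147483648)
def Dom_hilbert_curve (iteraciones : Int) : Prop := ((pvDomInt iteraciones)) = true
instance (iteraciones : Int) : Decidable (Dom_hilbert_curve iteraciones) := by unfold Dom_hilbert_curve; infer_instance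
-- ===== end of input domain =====

-- B replaces A's level-by-level rewriting of the whole string with a depth-first
-- recursive per-symbol expansion (alternative decomposition, same cost).

-- ===== PORT A =====
-- config["reglas"]: the L-system substitution rules (keys are single-character strings,
-- ported as Char since the loop variable 'letra' ranges over single characters)
def hilbert_reglas : PySem.Dict Char String :=
  PySem.Dict.ofList [('X', "+YF-XFX-FY+"), ('Y', "-XF+YFY+FX-")]

def hilbert_curve (iteraciones : Int) : String :=
  -- for _ in range(iteraciones): rewrite every letter of cadena_inicial via reglas.get(letra, letra)
  (PySem.List.pyRange 0 iteraciones 1).foldl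
    (fun cadena_inicial _ =>
      cadena_inicial.toList.foldl
        (fun dibujo letra => dibujo ++ hilbert_reglas.getD letra (String.ofList [letra])) "")
    "X"

-- ===== PORT B =====
def hilbert_reglas_alt : PySem.Dict Char String :=
  PySem.Dict.ofList [('X', "+YF-XFX-FY+"), ('Y', "-XF+YFY+FX-")]

-- expand(symbol, depth): 'if depth <= 0: return symbol' — the Int depth only ever
-- decreases by 1, so it is carried as the Nat (depth.toNat), whose 0 is exactly 'depth <= 0'
def hilbert_expand (symbol : Char) (depth : Nat) : String :=
  match depth with
  | 0 => String.ofList [symbol]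
  | d + 1 =>
    String.join (((hilbert_reglas_alt.getD symbol (String.ofList [symbol])).toList).map
      (fun c => hilbert_expand c d))

def hilbert_curve_alt (iteraciones : Int) : String :=
  hilbert_expand 'X' iteraciones.toNat

-- ===== PRECONDITION & SPEC =====
def Spec_hilbert_curve (iteraciones : Int) (out : String) : Prop := out = hilbert_curve_alt iteraciones
instance (iteraciones : Int) (out : String) : Decidable (Spec_hilbert_curve iteraciones out) := by unfold Spec_hilbert_curve; infer_instance

-- ===== CLAIM (what is proved, stated in full; the proofs are below) =====
def Claim_equal_hilbert_curve : Prop := ∀ (iteraciones : Int), Dom_hilbert_curve iteraciones → Spec_hilbert_curve iteraciones (hilbert_curve iteraciones)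

-- ===== LEMMAS AND PROOFS =====

-- the substitution rule of one character, as a list of characters
def ruleL (c : Char) : List Char := (hilbert_reglas.getD c (String.ofList [c])).toList

-- list-level version of B's expansion
def expandL (c : Char) : Nat → List Char
  | 0 => [c]
  | d + 1 => (ruleL c).flatMap (fun c' => expandL c' d)

-- B's port computes expandL, read through toList
lemma expand_toList (c : Char) (d : Nat) : (hilbert_expand c d).toList = expandL c d := by
  induction d generalizing c with
  | zero => simp [hilbert_expand, expandL]
  | succ d ih =>
    show (hilbert_expand c (d + 1)).toList = expandL c (d + 1)
    simp [hilbert_expand, expandL, String.toList_join, List.flatMap, ruleL,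
      List.map_map, Function.comp_def, ih]
    rfl

-- A's inner loop over a string: foldl-append accumulates the concatenated rules
lemma inner_foldl (s : List Char) (acc : String) :
    (s.foldl (fun dibujo letra => dibujo ++ hilbert_reglas.getD letra (String.ofList [letra])) acc).toList
      = acc.toList ++ s.flatMap ruleL := by
  induction s generalizing acc with
  | nil => simp
  | cons c t ih =>
    simp only [List.foldl_cons, List.flatMap_cons, ih, String.toList_append, ruleL,
      List.append_assoc]

-- folding a constant function over a list is iteration by its length
lemma foldl_const_iterate {α β : Type} (f : α → α) (l : List β) (init : α) :
    l.foldl (fun s _ => f s) init = f^[l.length] init := by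
  induction l generalizing init with
  | nil => rfl
  | cons b t ih => simp [List.foldl_cons, ih, Function.iterate_succ_apply]

-- one whole-string rewriting step, on lists of characters
def stepL (s : List Char) : List Char := s.flatMap ruleL

-- level-by-level iteration equals per-symbol depth-first expansion
lemma iterate_step (m : Nat) (s : List Char) :
    stepL^[m] s = s.flatMap (fun c => expandL c m) := by
  induction m generalizing s with
  | zero => simp [expandL]
  | succ m ih =>
    rw [Function.iterate_succ_apply, ih]
    simp [stepL, expandL, List.flatMap_assoc]

-- ===== VERDICT (by name: the statement is the Claim_ definition above) =====
theorem hilbert_curve_spec : Claim_equal_hilbert_curve := by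
  intro n _
  unfold Spec_hilbert_curve hilbert_curve hilbert_curve_alt
  apply String.toList_inj.mp
  rw [foldl_const_iterate
    (fun cadena_inicial : String =>
      cadena_inicial.toList.foldl
        (fun dibujo letra => dibujo ++ hilbert_reglas.getD letra (String.ofList [letra])) "")]
  have hlen : (PySem.List.pyRange 0 n 1).length = n.toNat := by
    simp [PySem.List.length_pyRange_one]
  rw [hlen, expand_toList]
  have key : ∀ (m : Nat) (s : String),
      ((fun cadena_inicial : String =>
        cadena_inicial.toList.foldl
          (fun dibujo letra => dibujo ++ hilbert_reglas.getD letra (String.ofList [letra])) "")^[m] s).toList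
        = stepL^[m] s.toList := by
    intro m
    induction m with
    | zero => intro s; rfl
    | succ m ih =>
      intro s
      rw [Function.iterate_succ_apply, ih]
      have hstep : ((fun cadena_inicial : String =>
          cadena_inicial.toList.foldl
            (fun dibujo letra => dibujo ++ hilbert_reglas.getD letra (String.ofList [letra])) "") s).toList
          = stepL s.toList := by
        show (s.toList.foldl _ "").toList = stepL s.toList
        rw [inner_foldl]; simp [stepL]
      rw [hstep, ← Function.iterate_succ_apply]
  rw [key, iterate_step]
  simp
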